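-- pv_equiv track=rewrite | github.com/MobillsInMobild/Cryptography-Experiments | Classical Cryptography/HillCipher.py | HillCipherEncode
-- ===== SOURCE A (Python) =====
-- Alphabet="abcdefghijklmnopqrstuvwxyz"
--
-- def multiplyMatrix(A,B):
--     lenA=len(A)
--     lenARow=len(A[0])
--     lenBRow=len(B[0])
--     ans=[]
--     # 将ans矩阵置为0矩阵
--     cur=[0]*lenBRow
--     for i in range(lenA):
--         ans.append(cur.copy())
--     for i in range(lenA):
--         for j in range(lenBRow):
--             now=0
--             for k in range(lenARow):
--                 now+=A[i][k]*B[k][j]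
--             ans[i][j]=now%26
--     return ans
--
-- def HillCipherEncode(m,k):
--     # 位数不够就补充x
--     if(len(m)%len(k)!=0):
--         m+="x"*(len(k)-len(m)%len(k))
--     lenM=len(m)
--     lenK=len(k)
--     A=[]
--     for i in range(lenM//lenK):
--         A.append([])
--         for j in range(i*lenK,(i+1)*lenK):
--             A[-1].append(Alphabet.index(m[j]))
--     ans=multiplyMatrix(A,k)
--     c=''
--     for i in ans:
--         for j in i:
--             c+=Alphabet[j]
--     return c
-- ===== SOURCE B (Python) =====
-- Alphabet = "abcdefghijklmnopqrstuvwxyz"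
--
--
-- def HillCipherEncode(m, k):
--     # Precompute a (row t, letter v) -> contribution-vector table, then stream the
--     # plaintext character by character, adding table rows into a running mod-26
--     # accumulator and flushing it to ciphertext at each block boundary.
--     n = len(k)
--     cols = len(k[0])
--     if len(m) % n:
--         m += "x" * (n - len(m) % n)
--     tab = [[[(v * row[j]) % 26 for j in range(cols)] for v in range(26)]
--            for row in k]
--     out = []
--     acc = [0] * cols
--     t = 0
--     for ch in m:
--         contrib = tab[t][Alphabet.index(ch)]
--         acc = [(a + c) % 26 for a, c in zip(acc, contrib)]
--         t += 1
--         if t == n: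
--             out.extend(Alphabet[a] for a in acc)
--             acc = [0] * cols
--             t = 0
--     return ''.join(out)
-- ===== Notes on version B (the rewrite author's own statement) =====
-- stated objective: alternative
-- what changed: B replaces the block-matrix multiplication with a precomputed (key-row, letter) -> contribution-vector lookup table and a single character-by-character streaming pass that adds table rows into a running mod-26 accumulator, flushing it at each block boundary; no plaintext matrix, no dot-product loop.
import Mathlib
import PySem

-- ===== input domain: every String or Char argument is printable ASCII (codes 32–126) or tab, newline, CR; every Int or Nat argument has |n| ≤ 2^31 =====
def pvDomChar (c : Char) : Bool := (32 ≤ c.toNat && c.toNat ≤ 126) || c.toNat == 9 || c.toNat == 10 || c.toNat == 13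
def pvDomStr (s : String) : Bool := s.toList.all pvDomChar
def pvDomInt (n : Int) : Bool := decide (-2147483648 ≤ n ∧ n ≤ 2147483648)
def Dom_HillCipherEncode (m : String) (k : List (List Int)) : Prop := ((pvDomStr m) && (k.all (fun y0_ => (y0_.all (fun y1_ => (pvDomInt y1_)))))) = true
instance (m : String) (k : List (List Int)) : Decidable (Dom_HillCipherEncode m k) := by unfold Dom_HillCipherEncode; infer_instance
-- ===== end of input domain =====

-- B replaces the block-matrix multiplication by a precomputed (key-row, letter) →
-- contribution-vector table plus one streaming pass with a running mod-26
-- accumulator flushed at block boundaries; objective: alternative.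

-- ===== PORT A =====

def pvAlpha : List Char :=
  ['a','b','c','d','e','f','g','h','i','j','k','l','m','n','o','p','q','r','s','t','u','v','w','x','y','z']

-- Alphabet.index(c); raises ValueError for a char off the alphabet (excluded by Pre_),
-- so the `getD 0` default is never reached on admitted inputs.
def pvAlphaIdx (c : Char) : Int := ((PySem.List.index? pvAlpha c).getD 0 : Nat)

-- multiplyMatrix(A, B): ans starts as a lenA × lenBRow zero matrix and every entry is
-- then assigned now % 26, so it is exactly the map written here.
def multiplyMatrix (A B : List (List Int)) : List (List Int) :=
  let lenA := A.length
  let lenARow := (A.headD []).length   -- len(A[0]); IndexError on A = [] is excluded by Pre_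
  let lenBRow := (B.headD []).length
  (List.range lenA).map (fun i =>
    (List.range lenBRow).map (fun j =>
      PySem.Int.mod
        ((List.range lenARow).foldl
          (fun now t => now + ((A.getD i []).getD t 0) * ((B.getD t []).getD j 0)) 0)
        26))

def HillCipherEncode (m : String) (k : List (List Int)) : String :=
  let m0 := m.toList
  let m1 := if m0.length % k.length ≠ 0 then
              m0 ++ List.replicate (k.length - m0.length % k.length) 'x' else m0
  let lenM := m1.length
  let lenK := k.length
  let A := (List.range (lenM / lenK)).map (fun i =>
    (List.range' (i * lenK) lenK).map (fun j => pvAlphaIdx (m1.getD j ' ')))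
  let ans := multiplyMatrix A k
  String.ofList (ans.foldl (fun c row =>
    row.foldl (fun c j => c ++ [PySem.List.pyGetD pvAlpha j ' ']) c) [])

-- ===== PORT B =====

-- tab[t][v][j] = (v * k[t][j]) % 26
def pvTab (k : List (List Int)) (cols : Nat) : List (List (List Int)) :=
  k.map (fun row => (List.range 26).map (fun (v : Nat) =>
    (List.range cols).map (fun j => PySem.Int.mod ((v : Int) * row.getD j 0) 26)))

-- the body of Source B's for-loop: state is (out, acc, t)
def pvStep (n cols : Nat) (tab : List (List (List Int)))
    (st : List Char × List Int × Nat) (ch : Char) : List Char × List Int × Nat :=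
  let contrib := (tab.getD st.2.2 []).getD ((PySem.List.index? pvAlpha ch).getD 0) []
  let acc := List.zipWith (fun a c => PySem.Int.mod (a + c) 26) st.2.1 contrib
  if st.2.2 + 1 = n then
    (st.1 ++ acc.map (fun a => PySem.List.pyGetD pvAlpha a ' '), List.replicate cols 0, 0)
  else (st.1, acc, st.2.2 + 1)

def HillCipherEncode_alt (m : String) (k : List (List Int)) : String :=
  let n := k.length
  let cols := (k.headD []).length
  let m0 := m.toList
  let m1 := if m0.length % n ≠ 0 then m0 ++ List.replicate (n - m0.length % n) 'x' else m0
  String.ofList ((m1.foldl (pvStep n cols (pvTab k cols)) ([], List.replicate cols 0, 0)).1)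

-- ===== PRECONDITION & SPEC =====
-- Pre_ is exactly where A returns: k ≠ [] (else ZeroDivisionError), m ≠ "" (else
-- IndexError on len(A[0])), every char of m in the lowercase alphabet (else ValueError
-- from Alphabet.index), and every row of k at least as long as k[0] (else IndexError).
def Pre_HillCipherEncode (m : String) (k : List (List Int)) : Prop :=
  k ≠ [] ∧ m ≠ "" ∧ (m.toList.all (fun c => c ∈ pvAlpha)) = true ∧
    (∀ row ∈ k, (k.headD []).length ≤ row.length)
instance (m : String) (k : List (List Int)) : Decidable (Pre_HillCipherEncode m k) := by
  unfold Pre_HillCipherEncode; infer_instance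

def pvWitness_HillCipherEncode : String × List (List Int) := ("hello", [[3, 3], [2, 5]])

def Spec_HillCipherEncode (m : String) (k : List (List Int)) (out : String) : Prop :=
  out = HillCipherEncode_alt m k
instance (m : String) (k : List (List Int)) (out : String) :
    Decidable (Spec_HillCipherEncode m k out) := by unfold Spec_HillCipherEncode; infer_instance

-- ===== CLAIM (what is proved, stated in full; the proofs are below) =====
def Claim_equal_HillCipherEncode : Prop := ∀ (m : String) (k : List (List Int)),
  Dom_HillCipherEncode m k → Pre_HillCipherEncode m k →
    Spec_HillCipherEncode m k (HillCipherEncode m k)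

-- ===== LEMMAS AND PROOFS =====

-- the raw dot product Source B accumulates (before the final mod): characters of the
-- block against rows t, t+1, … of the key, all at column j
def pvSum (k : List (List Int)) (j : Nat) : List Char → Nat → Int
  | [], _ => 0
  | c :: bs, t => pvAlphaIdx c * (k.getD t []).getD j 0 + pvSum k j bs (t + 1)

-- ciphertext of q blocks read off the front of L, block by block
def pvEnc (k : List (List Int)) (n cols : Nat) : Nat → List Char → List Char
  | 0, _ => []
  | q + 1, L =>
      (List.range cols).map (fun j =>
        PySem.List.pyGetD pvAlpha (PySem.Int.mod (pvSum k j (L.take n) 0) 26) ' ')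
      ++ pvEnc k n cols q (L.drop n)

-- a contiguous slice written as a map of indices
lemma take_drop_eq_map_range' {α : Type} (l : List α) (a nl : Nat) (d : α)
    (h : a + nl ≤ l.length) :
    (l.drop a).take nl = (List.range' a nl).map (fun j => l.getD j d) := by
  apply List.ext_getElem
  · simp [List.length_take, List.length_drop]; omega
  · intro i h1 h2
    have hi : i < nl := by simpa using h2
    have : a + i < l.length := by omega
    simp [List.getElem_take, List.getElem_drop, List.getElem_range',
      List.getD_eq_getElem?_getD, List.getElem?_eq_getElem this]

lemma getD_map_range'_lem {β : Type} (f : Nat → β) (a nl s : Nat) (d : β) (hs : s < nl) :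
    (((List.range' a nl).map f).getD s d) = f (a + s) := by
  have h1 : s < ((List.range' a nl).map f).length := by simpa using hs
  rw [List.getD_eq_getElem _ _ h1, List.getElem_map, List.getElem_range']
  congr 1
  omega

lemma headD_map_range {β : Type} (f : Nat → β) (q : Nat) (d : β) (hq : 0 < q) :
    (((List.range q).map f).headD d) = f 0 := by
  cases q with
  | zero => omega
  | succ qq => rw [List.range_succ_eq_map]; simp

lemma flatMap_congr {α β : Type} (l : List α) (f g : α → List β)
    (h : ∀ a ∈ l, f a = g a) : l.flatMap f = l.flatMap g := by
  induction l with
  | nil => rfl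
  | cons x xs ih =>
    simp only [List.flatMap_cons, h x (by simp), ih (fun a ha => h a (by simp [ha]))]

-- alphabet index of an alphabet char is < 26
lemma alphaIdx_lt (c : Char) (hc : c ∈ pvAlpha) :
    ((PySem.List.index? pvAlpha c).getD 0) < 26 := by
  have hs : (PySem.List.index? pvAlpha c).isSome :=
    (PySem.List.index?_isSome_iff pvAlpha c).mpr hc
  obtain ⟨i, hi⟩ := Option.isSome_iff_exists.mp hs
  obtain ⟨hlt, -, -⟩ := PySem.List.getElem_of_index?_eq_some hi
  have hgd : (PySem.List.index? pvAlpha c).getD 0 = i := by rw [hi]; rfl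
  rw [hgd]
  exact lt_of_lt_of_eq hlt (by decide)

-- table lookup: tab[t][v] is row t of k scaled by v, entrywise mod 26
lemma tab_getD (k : List (List Int)) (cols t v : Nat) (ht : t < k.length) (hv : v < 26) :
    (((pvTab k cols).getD t []).getD v []) =
      (List.range cols).map (fun j => PySem.Int.mod ((v : Int) * (k.getD t []).getD j 0) 26) := by
  unfold pvTab
  have h1 : t < (k.map (fun row => (List.range 26).map (fun (v : Nat) =>
      (List.range cols).map (fun j => PySem.Int.mod ((v : Int) * row.getD j 0) 26)))).length := by
    simpa using ht
  rw [List.getD_eq_getElem _ _ h1, List.getElem_map,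
    PySem.List.getD_map_range _ 26 v _ hv, List.getD_eq_getElem _ _ ht]

lemma zipWith_map_same {α β γ δ : Type} (f : β → γ → δ) (g : α → β) (h : α → γ)
    (l : List α) : List.zipWith f (l.map g) (l.map h) = l.map (fun x => f (g x) (h x)) := by
  induction l with
  | nil => rfl
  | cons x xs ih => simp [ih]

-- combining two already-reduced values mod 26
lemma mod_add_mod (a b : Int) :
    PySem.Int.mod (PySem.Int.mod a 26 + PySem.Int.mod b 26) 26 = PySem.Int.mod (a + b) 26 := by
  simp only [PySem.Int.mod_eq_emod_of_pos (show (0:Int) < 26 by norm_num)]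
  exact (Int.add_emod a b 26).symm

-- one whole block: starting at counter t with partially accumulated sums P, the fold
-- over the remaining n - t characters flushes exactly one ciphertext block
lemma fold_block (k : List (List Int)) (cols : Nat) :
    ∀ (bs : List Char) (t : Nat) (P : Nat → Int) (out : List Char),
      bs ≠ [] → t + bs.length = k.length → (∀ c ∈ bs, c ∈ pvAlpha) →
      bs.foldl (pvStep k.length cols (pvTab k cols))
        (out, (List.range cols).map (fun j => PySem.Int.mod (P j) 26), t)
      = (out ++ (List.range cols).map (fun j =>
            PySem.List.pyGetD pvAlpha (PySem.Int.mod (P j + pvSum k j bs t) 26) ' '),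
         List.replicate cols 0, 0) := by
  intro bs
  induction bs with
  | nil => intro t P out hne _ _; exact absurd rfl hne
  | cons c bs ih =>
    intro t P out _ hlen hall
    have hc : c ∈ pvAlpha := hall c (by simp)
    have ht : t < k.length := by simp at hlen; omega
    have hv : ((PySem.List.index? pvAlpha c).getD 0) < 26 := alphaIdx_lt c hc
    rw [List.foldl_cons]
    have hstep : pvStep k.length cols (pvTab k cols)
        (out, (List.range cols).map (fun j => PySem.Int.mod (P j) 26), t) c
        = if t + 1 = k.length then
            (out ++ (List.range cols).map (fun j =>
              PySem.List.pyGetD pvAlpha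
                (PySem.Int.mod (P j + pvAlphaIdx c * (k.getD t []).getD j 0) 26) ' '),
             List.replicate cols 0, 0)
          else
            (out, (List.range cols).map (fun j =>
              PySem.Int.mod (P j + pvAlphaIdx c * (k.getD t []).getD j 0) 26), t + 1) := by
      unfold pvStep
      simp only [tab_getD k cols t _ ht hv, zipWith_map_same]
      have hacc : (fun j => PySem.Int.mod
            (PySem.Int.mod (P j) 26 +
              PySem.Int.mod ((((PySem.List.index? pvAlpha c).getD 0 : Nat) : Int) *
                (k.getD t []).getD j 0) 26) 26)
          = fun j => PySem.Int.mod (P j + pvAlphaIdx c * (k.getD t []).getD j 0) 26 := by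
        funext j; rw [mod_add_mod]; rfl
      rw [hacc]
      simp only [List.map_map]
      rfl
    rw [hstep]
    by_cases hend : t + 1 = k.length
    · have hbs : bs = [] := by
        have : bs.length = 0 := by simp at hlen; omega
        exact List.length_eq_zero_iff.mp this
      subst hbs
      simp only [if_pos hend, List.foldl_nil, pvSum]
      norm_num
    · have hbsne : bs ≠ [] := by
        intro h; subst h; simp at hlen; exact hend hlen
      rw [if_neg hend,
        ih (t + 1) (fun j => P j + pvAlphaIdx c * (k.getD t []).getD j 0) out hbsne
          (by simp at hlen ⊢; omega) (fun c' hc' => hall c' (by simp [hc']))]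
      simp only [pvSum, add_assoc]

-- the last char of a full block flushes: fold_block specialised to a fresh block
lemma fold_block0 (k : List (List Int)) (cols : Nat) (bs : List Char) (out : List Char)
    (hne : bs ≠ []) (hlen : bs.length = k.length) (hall : ∀ c ∈ bs, c ∈ pvAlpha) :
    bs.foldl (pvStep k.length cols (pvTab k cols)) (out, List.replicate cols 0, 0)
    = (out ++ (List.range cols).map (fun j =>
        PySem.List.pyGetD pvAlpha (PySem.Int.mod (pvSum k j bs 0) 26) ' '),
       List.replicate cols 0, 0) := by
  have hzeros : (List.replicate cols (0 : Int))
      = (List.range cols).map (fun j => PySem.Int.mod ((fun _ => (0 : Int)) j) 26) := by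
    have hm0 : (fun j : Nat => PySem.Int.mod ((fun _ => (0 : Int)) j) 26)
        = fun _ : Nat => (0 : Int) := by
      funext j
      show PySem.Int.mod (0 : Int) 26 = 0
      decide
    rw [hm0]
    simp [List.map_const']
  conv_lhs => rw [hzeros]
  rw [fold_block k cols bs 0 (fun _ => 0) out hne (by simp [hlen]) hall]
  simp

-- the whole streaming pass: q blocks in, q encoded blocks out
lemma fold_blocks (k : List (List Int)) (cols : Nat) (hk : k ≠ []) :
    ∀ (q : Nat) (L : List Char) (out : List Char),
      L.length = q * k.length → (∀ c ∈ L, c ∈ pvAlpha) →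
      L.foldl (pvStep k.length cols (pvTab k cols)) (out, List.replicate cols 0, 0)
      = (out ++ pvEnc k k.length cols q L, List.replicate cols 0, 0) := by
  have hn : 0 < k.length := List.length_pos_iff.mpr hk
  intro q
  induction q with
  | zero =>
    intro L out hlen _
    have : L = [] := List.length_eq_zero_iff.mp (by omega)
    subst this
    simp [pvEnc]
  | succ q ih =>
    intro L out hlen hall
    have hnle : k.length ≤ L.length := by
      rw [hlen, Nat.add_mul, Nat.one_mul]; omega
    have hsplit : L = L.take k.length ++ L.drop k.length := (List.take_append_drop _ _).symm
    have hfold : L.foldl (pvStep k.length cols (pvTab k cols)) (out, List.replicate cols 0, 0)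
        = (L.drop k.length).foldl (pvStep k.length cols (pvTab k cols))
            ((L.take k.length).foldl (pvStep k.length cols (pvTab k cols))
              (out, List.replicate cols 0, 0)) := by
      conv_lhs => rw [hsplit]
      rw [List.foldl_append]
    rw [hfold,
      fold_block0 k cols (L.take k.length) out
        (by
          have hlt : (L.take k.length).length = k.length := by
            rw [List.length_take, Nat.min_eq_left hnle]
          intro h
          rw [h] at hlt
          simp at hlt
          omega)
        (by simp [Nat.min_eq_left hnle])
        (fun c hc => hall c (List.mem_of_mem_take hc)),
      ih (L.drop k.length) _ (by rw [List.length_drop, hlen, Nat.add_mul, Nat.one_mul]; omega)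
        (fun c hc => hall c (List.mem_of_mem_drop hc))]
    simp only [pvEnc, List.append_assoc]

-- pvEnc written as an index-driven flatMap over block numbers
lemma pvEnc_eq (k : List (List Int)) (cols : Nat) :
    ∀ (q : Nat) (L : List Char),
      pvEnc k k.length cols q L
      = (List.range q).flatMap (fun i => (List.range cols).map (fun j =>
          PySem.List.pyGetD pvAlpha
            (PySem.Int.mod (pvSum k j ((L.drop (i * k.length)).take k.length) 0) 26) ' ')) := by
  intro q
  induction q with
  | zero => intro L; simp [pvEnc]
  | succ q ih =>
    intro L
    rw [pvEnc, ih (L.drop k.length), List.range_succ_eq_map, List.flatMap_cons, List.flatMap_map]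
    congr 1
    · simp
    · apply flatMap_congr
      intro i _
      have harg : (List.drop k.length L).drop (i * k.length)
          = L.drop ((i + 1) * k.length) := by
        rw [List.drop_drop]
        congr 1
        ring
      rw [harg]
  
-- pvSum as the indexed sum the A side computes
lemma pvSum_eq_sum (k : List (List Int)) (j : Nat) :
    ∀ (bs : List Char) (t : Nat),
      pvSum k j bs t
      = ((List.range bs.length).map (fun s =>
          pvAlphaIdx (bs.getD s ' ') * (k.getD (t + s) []).getD j 0)).sum := by
  intro bs
  induction bs with
  | nil => intro t; simp [pvSum]
  | cons c bs ih =>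
    intro t
    rw [pvSum, ih (t + 1), List.length_cons, List.range_succ_eq_map, List.map_cons,
      List.map_map, List.sum_cons]
    simp only [Function.comp_def, List.getD_cons_succ, List.getD_cons_zero, Nat.add_zero]
    congr 1
    apply congrArg
    apply List.map_congr_left
    intro s _
    have harith : t + 1 + s = t + (s + 1) := by omega
    rw [harith]

-- ===== VERDICT (by name: the statement is the Claim_ definition above) =====
theorem HillCipherEncode_spec : Claim_equal_HillCipherEncode := by
  intro m k _ hpre
  obtain ⟨hk, hm, halpha, hrows⟩ := hpre
  have hn : 0 < k.length := List.length_pos_iff.mpr hk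
  unfold Spec_HillCipherEncode HillCipherEncode HillCipherEncode_alt multiplyMatrix
  dsimp only
  set n := k.length with hndef
  set m0 := m.toList with hm0def
  have hm0ne : 0 < m0.length := by
    rw [hm0def, List.length_pos_iff]
    intro h
    exact hm (by rwa [← String.toList_eq_nil_iff])
  set m1 := (if m0.length % n ≠ 0 then m0 ++ List.replicate (n - m0.length % n) 'x' else m0)
    with hm1def
  have hm1pos : 0 < m1.length := by
    rw [hm1def]; split
    · simp only [List.length_append]; omega
    · omega
  have hmod : m1.length % n = 0 := by
    rw [hm1def]; split
    · rename_i h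
      have h1 := Nat.mod_lt m0.length hn
      have h2 := Nat.div_add_mod m0.length n
      have h3 : m0.length + (n - m0.length % n) = n * (m0.length / n + 1) := by
        rw [Nat.mul_add, Nat.mul_one]; omega
      simp only [List.length_append, List.length_replicate, h3]
      exact Nat.mul_mod_right _ _
    · omega
  have hm1alpha : ∀ c ∈ m1, c ∈ pvAlpha := by
    intro c hc
    rw [hm1def] at hc
    have hmem : ∀ c ∈ m0, c ∈ pvAlpha := by
      intro c' hc'
      have := List.all_eq_true.mp halpha c' hc'
      simpa using this
    split at hc
    · rcases List.mem_append.mp hc with h | h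
      · exact hmem c h
      · have : c = 'x' := List.eq_of_mem_replicate h
        subst this; decide
    · exact hmem c hc
  set q := m1.length / n with hqdef
  have hlen : m1.length = q * n := (Nat.div_mul_cancel (Nat.dvd_of_mod_eq_zero hmod)).symm
  have hq : 0 < q := by
    rcases Nat.eq_zero_or_pos q with h | h
    · rw [h, Nat.zero_mul] at hlen; omega
    · exact h
  refine congrArg String.ofList ?_
  -- ===== A side =====
  set rowFun : Nat → List Int :=
    (fun i => List.map (fun j => pvAlphaIdx (m1.getD j ' ')) (List.range' (i * n) n))
    with hrowdef
  simp only [List.length_map, List.length_range]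
  rw [headD_map_range rowFun q [] hq]
  have hrowlen : (rowFun 0).length = n := by rw [hrowdef]; simp
  rw [hrowlen]
  have hinner : (fun (c : List Char) (row : List Int) =>
        List.foldl (fun c j => c ++ [PySem.List.pyGetD pvAlpha j ' ']) c row)
      = fun c row => c ++ row.map (fun j => PySem.List.pyGetD pvAlpha j ' ') := by
    funext c row
    exact PySem.List.foldl_append_singleton_eq_map _ row c
  rw [hinner, PySem.List.foldl_append_eq_flatMap, List.nil_append, List.flatMap_map]
  -- ===== B side =====
  rw [fold_blocks k _ hk q m1 [] hlen hm1alpha, List.nil_append, pvEnc_eq]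
  -- ===== both are flatMaps over range q; compare blockwise =====
  apply flatMap_congr
  intro i hi
  have hiq : i < q := List.mem_range.mp hi
  rw [List.map_map]
  refine List.map_congr_left (fun j _ => ?_)
  simp only [Function.comp_apply]
  rw [PySem.List.getD_map_range rowFun q i [] hiq,
    PySem.List.foldl_add (List.range n) (fun t => (rowFun i).getD t 0 * (k.getD t []).getD j 0) 0]
  have hle : i * n + n ≤ m1.length := by
    have h2 : (i + 1) * n ≤ q * n := Nat.mul_le_mul_right n (by omega)
    rw [hlen]
    calc i * n + n = (i + 1) * n := by ring
    _ ≤ q * n := h2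
  have hbs : ((m1.drop (i * n)).take n) = (List.range' (i * n) n).map (fun jj => m1.getD jj ' ') :=
    take_drop_eq_map_range' m1 (i * n) n ' ' hle
  have hbslen : ((m1.drop (i * n)).take n).length = n := by
    rw [hbs]; simp
  have hsum : ((List.range n).map (fun t => (rowFun i).getD t 0 * (k.getD t []).getD j 0)).sum
      = ((List.range n).map (fun s => pvAlphaIdx (((m1.drop (i * n)).take n).getD s ' ') *
          (k.getD (0 + s) []).getD j 0)).sum := by
    apply congrArg
    apply List.map_congr_left
    intro s hs
    have hsn : s < n := List.mem_range.mp hs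
    rw [hbs, getD_map_range'_lem (fun jj => m1.getD jj ' ') (i * n) n s ' ' hsn, hrowdef]
    dsimp only
    rw [getD_map_range'_lem (fun jj => pvAlphaIdx (m1.getD jj ' ')) (i * n) n s 0 hsn,
      Nat.zero_add]
  rw [pvSum_eq_sum k j ((m1.drop (i * n)).take n) 0, hbslen, hsum, zero_add]
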